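-- pv_equiv track=rewrite | github.com/aphoticshaman/HungryOrca | project_gatorca.py | _extract_notebook_operations
-- ===== SOURCE A (Python) =====
-- from typing import Dict, List, Any, Tuple
--
-- def _extract_notebook_operations(code_cells: List[Dict]) -> List[str]:
--     """Extract operations from notebook code cells"""
--     operations = []
--     for cell in code_cells[:10]:  # First 10 cells
--         source = ''.join(cell.get('source', []))
--         # Look for grid operations
--         if 'flip' in source or 'rotate' in source or 'reflect' in source:
--             operations.append('transformation')
--         if 'grid' in source or 'matrix' in source:
--             operations.append('grid_ops')
--     return list(set(operations))
-- ===== SOURCE B (Python) =====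
-- def _extract_notebook_operations(code_cells):
--     """Extract operations from notebook code cells"""
--     def scan(cells, limit, keywords):
--         # recursively scan cells with early exit, at most `limit` cells
--         if limit == 0 or not cells:
--             return False
--         source = ''.join(cells[0].get('source', []))
--         if any(kw in source for kw in keywords):
--             return True
--         return scan(cells[1:], limit - 1, keywords)
--
--     ops = []
--     if scan(code_cells, 10, ['flip', 'rotate', 'reflect']):
--         ops.append('transformation')
--     if scan(code_cells, 10, ['grid', 'matrix']):
--         ops.append('grid_ops')
--     return ops
-- ===== Notes on version B (the rewrite author's own statement) =====
-- stated objective: alternative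
-- what changed: Replaces A's accumulate-then-dedup fold over the sliced cell list by a recursive early-exit scan (a limit-bounded keyword search over the cells, run once per tag with its keyword list), so no tag list is accumulated and no set dedup is needed.
import Mathlib
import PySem

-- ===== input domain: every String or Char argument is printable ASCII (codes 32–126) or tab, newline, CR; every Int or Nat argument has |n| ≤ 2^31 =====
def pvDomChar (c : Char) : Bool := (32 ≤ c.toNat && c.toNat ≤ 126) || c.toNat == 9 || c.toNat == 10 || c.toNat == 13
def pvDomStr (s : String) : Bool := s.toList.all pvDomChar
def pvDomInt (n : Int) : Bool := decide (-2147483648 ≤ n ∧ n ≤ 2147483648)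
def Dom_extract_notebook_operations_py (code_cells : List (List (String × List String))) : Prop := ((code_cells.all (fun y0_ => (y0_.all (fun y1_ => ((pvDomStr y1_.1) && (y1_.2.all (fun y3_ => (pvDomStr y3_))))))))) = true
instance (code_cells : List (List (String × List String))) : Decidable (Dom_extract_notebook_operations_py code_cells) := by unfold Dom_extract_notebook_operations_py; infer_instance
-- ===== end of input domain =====

-- B replaces A's accumulate-then-dedup fold by a recursive early-exit keyword scan run
-- once per tag, so no tag list is accumulated and no set dedup is needed (objective: alternative).

-- ===== PORT A =====
def extract_notebook_operations_py (code_cells : List (List (String × List String))) : List String :=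
  let operations : List String :=
    (PySem.List.slice code_cells none (some 10)).foldl
      (fun operations cell =>
        let source := PySem.Str.join "" (PySem.Dict.getD (PySem.Dict.mk cell) "source" [])
        let operations :=
          if PySem.Str.isIn "flip" source || PySem.Str.isIn "rotate" source
             || PySem.Str.isIn "reflect" source
          then operations ++ ["transformation"] else operations
        if PySem.Str.isIn "grid" source || PySem.Str.isIn "matrix" source
        then operations ++ ["grid_ops"] else operations)
      []
  PySem.Set.ofList operations

-- ===== PORT B =====
-- recursive early-exit scan of at most `limit` cells for any of the given keywords
def pvScanB (cells : List (List (String × List String))) (limit : Nat)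
    (keywords : List String) : Bool :=
  match limit, cells with
  | 0, _ => false
  | _ + 1, [] => false
  | n + 1, cell :: rest =>
    let source := PySem.Str.join "" (PySem.Dict.getD (PySem.Dict.mk cell) "source" [])
    if keywords.any (fun kw => PySem.Str.isIn kw source) then true
    else pvScanB rest n keywords

def extract_notebook_operations_py_alt (code_cells : List (List (String × List String))) : List String :=
  let ops : List String :=
    if pvScanB code_cells 10 ["flip", "rotate", "reflect"] then ["transformation"] else []
  if pvScanB code_cells 10 ["grid", "matrix"] then ops ++ ["grid_ops"] else ops

-- ===== PRECONDITION & SPEC =====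
-- helpers shared by Pre_ and the proofs (not ports): joined source of a cell and the two keyword tests
def pvSrc (c : List (String × List String)) : String :=
  PySem.Str.join "" (PySem.Dict.getD (PySem.Dict.mk c) "source" [])
def pvHasT (s : String) : Bool :=
  PySem.Str.isIn "flip" s || PySem.Str.isIn "rotate" s || PySem.Str.isIn "reflect" s
def pvHasG (s : String) : Bool :=
  PySem.Str.isIn "grid" s || PySem.Str.isIn "matrix" s

-- Pre_ excludes inputs whose first 10 cells contain both a transformation keyword and a
-- grid keyword: there A returns list(set(...)) of a two-element set, whose order is
-- hash-dependent and accidental.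
def Pre_extract_notebook_operations_py (code_cells : List (List (String × List String))) : Prop :=
  ¬ ((code_cells.take 10).any (fun c => pvHasT (pvSrc c)) = true
     ∧ (code_cells.take 10).any (fun c => pvHasG (pvSrc c)) = true)
instance (code_cells : List (List (String × List String))) : Decidable (Pre_extract_notebook_operations_py code_cells) := by unfold Pre_extract_notebook_operations_py; infer_instance

def pvWitness_extract_notebook_operations_py : (List (List (String × List String))) :=
  [[("source", ["x = flip(g)"])], []]

def Spec_extract_notebook_operations_py (code_cells : List (List (String × List String))) (out : List String) : Prop := out = extract_notebook_operations_py_alt code_cells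
instance (code_cells : List (List (String × List String))) (out : List String) : Decidable (Spec_extract_notebook_operations_py code_cells out) := by unfold Spec_extract_notebook_operations_py; infer_instance

-- ===== CLAIM (what is proved, stated in full; the proofs are below) =====
def Claim_equal_extract_notebook_operations_py : Prop := ∀ (code_cells : List (List (String × List String))), Dom_extract_notebook_operations_py code_cells → Pre_extract_notebook_operations_py code_cells → Spec_extract_notebook_operations_py code_cells (extract_notebook_operations_py code_cells)

-- ===== LEMMAS AND PROOFS =====

-- the per-cell tag list A appends
def pvTags (c : List (String × List String)) : List String :=
  (if pvHasT (pvSrc c) then ["transformation"] else [])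
    ++ (if pvHasG (pvSrc c) then ["grid_ops"] else [])

theorem pv_foldlA (cells : List (List (String × List String))) (acc : List String) :
    cells.foldl
      (fun operations cell =>
        let source := PySem.Str.join "" (PySem.Dict.getD (PySem.Dict.mk cell) "source" [])
        let operations :=
          if PySem.Str.isIn "flip" source || PySem.Str.isIn "rotate" source
             || PySem.Str.isIn "reflect" source
          then operations ++ ["transformation"] else operations
        if PySem.Str.isIn "grid" source || PySem.Str.isIn "matrix" source
        then operations ++ ["grid_ops"] else operations)
      acc
      = acc ++ cells.flatMap pvTags := by
  induction cells generalizing acc with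
  | nil => simp
  | cons c cs ih =>
    rw [List.foldl_cons, ih, List.flatMap_cons, ← List.append_assoc]
    congr 1
    simp only [pvTags, pvSrc, pvHasT, pvHasG]
    split <;> split <;> simp

theorem pv_A_eq (code_cells : List (List (String × List String))) :
    extract_notebook_operations_py code_cells
      = PySem.Set.ofList ((code_cells.take 10).flatMap pvTags) := by
  unfold extract_notebook_operations_py
  rw [show PySem.List.slice code_cells none (some 10) = code_cells.take 10 from
      PySem.List.slice_to_natCast code_cells 10]
  rw [pv_foldlA]
  simp

-- the recursive scan computes 'any cell among the first limit satisfies some keyword'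
theorem pv_scanB_eq (cells : List (List (String × List String))) (limit : Nat)
    (keywords : List String) :
    pvScanB cells limit keywords
      = (cells.take limit).any (fun c => keywords.any (fun kw => PySem.Str.isIn kw (pvSrc c))) := by
  induction cells generalizing limit with
  | nil => cases limit <;> simp [pvScanB]
  | cons c cs ih =>
    cases limit with
    | zero => simp [pvScanB]
    | succ n =>
      simp only [pvScanB, pvSrc, List.take_succ_cons, List.any_cons]
      cases hcond : (keywords.any fun kw =>
          PySem.Str.isIn kw (PySem.Str.join "" (PySem.Dict.getD (PySem.Dict.mk c) "source" []))) with
      | true => simp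
      | false => rw [if_neg (by simp), Bool.false_or, ih]; rfl

theorem pv_B_eq (code_cells : List (List (String × List String))) :
    extract_notebook_operations_py_alt code_cells
      = (if (code_cells.take 10).any (fun c => pvHasT (pvSrc c)) then ["transformation"] else [])
        ++ (if (code_cells.take 10).any (fun c => pvHasG (pvSrc c)) then ["grid_ops"] else []) := by
  unfold extract_notebook_operations_py_alt
  rw [pv_scanB_eq, pv_scanB_eq]
  have hT : ∀ s, (["flip", "rotate", "reflect"].any (fun kw => PySem.Str.isIn kw s)) = pvHasT s := by
    intro s; simp [pvHasT, Bool.or_assoc]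
  have hG : ∀ s, (["grid", "matrix"].any (fun kw => PySem.Str.isIn kw s)) = pvHasG s := by
    intro s; simp [pvHasG]
  simp only [hT, hG]
  split <;> split <;> simp

theorem pv_foldl_add_const (tag : String) (l : List String) (acc : List String)
    (h : ∀ x ∈ l, x = tag) :
    l.foldl PySem.Set.add acc = if l.isEmpty then acc else PySem.Set.add acc tag := by
  induction l generalizing acc with
  | nil => simp
  | cons x xs ih =>
    have hx : x = tag := h x (by simp)
    simp only [List.foldl_cons, List.isEmpty_cons, hx]
    rw [ih _ (fun y hy => h y (by simp [hy]))]
    have hidem : PySem.Set.add (PySem.Set.add acc tag) tag = PySem.Set.add acc tag :=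
      PySem.Set.add_of_mem (by simp [PySem.Set.mem_add])
    split
    · rfl
    · simp [hidem]

theorem pv_ofList_tag {α : Type} (g : α → Bool) (tag : String)
    (cells : List α) :
    PySem.Set.ofList (cells.flatMap (fun c => if g c then [tag] else []))
      = if cells.any g then [tag] else [] := by
  rw [PySem.Set.ofList_eq_foldl]
  rw [pv_foldl_add_const tag _ []
      (by intro x hx
          simp only [List.mem_flatMap] at hx
          obtain ⟨c, _, hc⟩ := hx
          by_cases hg : g c
          · simp [hg] at hc; simp [hc]
          · simp [hg] at hc)]
  have : (cells.flatMap (fun c => if g c then [tag] else [])).isEmpty = !cells.any g := by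
    induction cells with
    | nil => simp
    | cons c cs ih => by_cases hg : g c <;> simp [hg, ih]
  rw [this]
  by_cases ha : cells.any g <;> simp [ha, PySem.Set.add]

-- ===== VERDICT (by name: the statement is the Claim_ definition above) =====
theorem extract_notebook_operations_py_spec : Claim_equal_extract_notebook_operations_py := by
  intro code_cells _ hpre
  unfold Spec_extract_notebook_operations_py
  unfold Pre_extract_notebook_operations_py at hpre
  rw [pv_A_eq, pv_B_eq]
  by_cases hT : (code_cells.take 10).any (fun c => pvHasT (pvSrc c)) = true
  · have hG : (code_cells.take 10).any (fun c => pvHasG (pvSrc c)) = false := by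
      cases hg : (code_cells.take 10).any (fun c => pvHasG (pvSrc c))
      · rfl
      · exact absurd ⟨hT, hg⟩ hpre
    have : (code_cells.take 10).flatMap pvTags
        = (code_cells.take 10).flatMap (fun c => if pvHasT (pvSrc c) then ["transformation"] else []) := by
      apply List.flatMap_congr
      intro c hc
      have : pvHasG (pvSrc c) = false := by
        simp only [List.any_eq_false] at hG
        simpa using hG c hc
      simp [pvTags, this]
    rw [this, pv_ofList_tag]
    simp [hT, hG]
  · have hT' : (code_cells.take 10).any (fun c => pvHasT (pvSrc c)) = false := by
      simpa using hT
    have : (code_cells.take 10).flatMap pvTags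
        = (code_cells.take 10).flatMap (fun c => if pvHasG (pvSrc c) then ["grid_ops"] else []) := by
      apply List.flatMap_congr
      intro c hc
      have : pvHasT (pvSrc c) = false := by
        simp only [List.any_eq_false] at hT'
        simpa using hT' c hc
      simp [pvTags, this]
    rw [this, pv_ofList_tag]
    simp [hT']
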